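-- pv_equiv track=rewrite | github.com/shanggeshihun/Algorithm | 20190715最优解/group/group_case_one.py | the_car_price_dict
-- ===== SOURCE A (Python) =====
-- def the_car_price_dict(total_car_cnt, step_1, delta_price_1, step_2, delta_price_2, step_3, delta_price_3):
--     """
--     total_car_cnt:单个包车辆数
--     step_1:第一个区间的下界
--     delta__price_1:第一个区间递涨单价
--     step_2:第二个区间的步长
--     delta_price_2:第二个区间递涨单价
--     step_3:第三个区间的步长
--     delta_price_3:第三个区间的递涨单价
--
--     return:price={the_car_number:price}
--     """
--     price = {}
--     if total_car_cnt >= 1 and total_car_cnt <= step_1: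
--         step_price_1 = delta_price_1 * total_car_cnt
--         for i in range(1, total_car_cnt + 1):
--             price[i] = step_price_1
--
--     elif total_car_cnt >= 1 + step_1 and total_car_cnt <= step_2 + step_1:
--         step_price_2 = step_1 * delta_price_1 + (total_car_cnt - step_1) * delta_price_2
--         step_price_1 = step_price_2
--         for i in range(1, total_car_cnt + 1):
--             price[i] = step_price_1
--     #        for i in range(total_car_cnt+1,step_1+step_2+step_3+1):
--     #            price[i]=0
--
--     elif total_car_cnt >= 1 + step_2 + step_1 and total_car_cnt <= step_1 + step_2 + step_3:
--         step_price_3 = step_1 * delta_price_1 + step_2 * delta_price_2 + (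
--                     total_car_cnt - step_1 - step_2) * delta_price_3
--         step_price_2, step_price_1 = step_price_3, step_price_3
--         for i in range(1, total_car_cnt + 1):
--             price[i] = step_price_1
--     #        for i in range(total_car_cnt+1,step_1+step_2+step_3+1):
--     #            price[i]=0
--     else:
--         step_price_3, step_price_2, step_price_1 = 0, 0, 0
--     return price
-- ===== SOURCE B (Python) =====
-- def the_car_price_dict(total_car_cnt, step_1, delta_price_1, step_2, delta_price_2, step_3, delta_price_3):
--     # Recursive rebasing: peel the first tier; either n lies in it (price n*delta),
--     # or shift n down by the tier size, solve the smaller problem, and add the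
--     # peeled tier's full cost.  No cumulative boundaries or base accumulator.
--     def band_price(n, tiers):
--         if not tiers:
--             return None
--         (size, delta), *rest = tiers
--         if 1 <= n <= size:
--             return n * delta
--         sub = band_price(n - size, rest)
--         return None if sub is None else size * delta + sub
--
--     p = band_price(total_car_cnt,
--                    [(step_1, delta_price_1), (step_2, delta_price_2), (step_3, delta_price_3)])
--     if p is None:
--         return {}
--     return {i: p for i in range(1, total_car_cnt + 1)}
-- ===== Notes on version B (the rewrite author's own statement) =====
-- stated objective: alternative
-- what changed: Replaces A's three hard-coded bands (each with its own closed-form price and fill loop) by a recursion that peels one tier at a time and REBASES n (solve band_price(n-size, rest) and add size*delta), then builds the dict with one comprehension; no cumulative boundaries or accumulated base are ever computed.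
import Mathlib
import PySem

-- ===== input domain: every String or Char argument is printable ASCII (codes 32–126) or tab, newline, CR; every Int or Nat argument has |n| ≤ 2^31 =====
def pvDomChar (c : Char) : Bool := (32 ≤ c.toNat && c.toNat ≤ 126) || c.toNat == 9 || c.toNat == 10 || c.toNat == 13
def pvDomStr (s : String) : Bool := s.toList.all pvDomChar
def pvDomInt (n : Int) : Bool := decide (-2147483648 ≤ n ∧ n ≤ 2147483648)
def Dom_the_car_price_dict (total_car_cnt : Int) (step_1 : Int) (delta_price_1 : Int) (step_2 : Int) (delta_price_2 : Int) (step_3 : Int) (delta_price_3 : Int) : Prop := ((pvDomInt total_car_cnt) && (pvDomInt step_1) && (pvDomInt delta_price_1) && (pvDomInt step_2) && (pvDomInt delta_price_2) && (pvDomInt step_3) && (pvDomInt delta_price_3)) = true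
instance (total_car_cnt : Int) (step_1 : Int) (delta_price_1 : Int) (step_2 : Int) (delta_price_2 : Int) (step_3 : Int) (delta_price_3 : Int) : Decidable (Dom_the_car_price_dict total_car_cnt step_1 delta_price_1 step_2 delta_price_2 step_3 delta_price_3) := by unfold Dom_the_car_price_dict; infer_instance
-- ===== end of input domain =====

-- B computes the band price by a recursion that peels one tier and REBASES n
-- (price = size*delta + band_price (n - size) rest), then builds the dict in one map,
-- instead of A's three hard-coded band formulas with per-branch fill loops
-- (objective: alternative decomposition; same cost).

-- ===== PORT A =====
def the_car_price_dict (total_car_cnt : Int) (step_1 : Int) (delta_price_1 : Int) (step_2 : Int) (delta_price_2 : Int) (step_3 : Int) (delta_price_3 : Int) : List (Int × Int) :=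
  let price : PySem.Dict Int Int := PySem.Dict.empty
  if 1 ≤ total_car_cnt ∧ total_car_cnt ≤ step_1 then
    let step_price_1 := delta_price_1 * total_car_cnt
    ((PySem.List.pyRange 1 (total_car_cnt + 1) 1).foldl
      (fun d i => d.insert i step_price_1) price).items
  else if 1 + step_1 ≤ total_car_cnt ∧ total_car_cnt ≤ step_2 + step_1 then
    let step_price_2 := step_1 * delta_price_1 + (total_car_cnt - step_1) * delta_price_2
    let step_price_1 := step_price_2
    ((PySem.List.pyRange 1 (total_car_cnt + 1) 1).foldl
      (fun d i => d.insert i step_price_1) price).items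
  else if 1 + step_2 + step_1 ≤ total_car_cnt ∧ total_car_cnt ≤ step_1 + step_2 + step_3 then
    let step_price_3 := step_1 * delta_price_1 + step_2 * delta_price_2 +
      (total_car_cnt - step_1 - step_2) * delta_price_3
    let step_price_1 := step_price_3
    ((PySem.List.pyRange 1 (total_car_cnt + 1) 1).foldl
      (fun d i => d.insert i step_price_1) price).items
  else
    price.items

-- ===== PORT B =====
-- Source B's band_price: peel the first tier; if n lies in it the price is n*delta,
-- otherwise rebase n by the tier size, recurse on the rest, and add size*delta.
def pvBandPrice (n : Int) (tiers : List (Int × Int)) : Option Int :=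
  match tiers with
  | [] => none
  | (size, delta) :: rest =>
    if 1 ≤ n ∧ n ≤ size then some (n * delta)
    else match pvBandPrice (n - size) rest with
      | none => none
      | some sub => some (size * delta + sub)

def the_car_price_dict_alt (total_car_cnt : Int) (step_1 : Int) (delta_price_1 : Int) (step_2 : Int) (delta_price_2 : Int) (step_3 : Int) (delta_price_3 : Int) : List (Int × Int) :=
  match pvBandPrice total_car_cnt [(step_1, delta_price_1), (step_2, delta_price_2), (step_3, delta_price_3)] with
  | none => []
  | some p => (PySem.List.pyRange 1 (total_car_cnt + 1) 1).map (fun i => (i, p))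

-- ===== PRECONDITION & SPEC =====
def Spec_the_car_price_dict (total_car_cnt : Int) (step_1 : Int) (delta_price_1 : Int) (step_2 : Int) (delta_price_2 : Int) (step_3 : Int) (delta_price_3 : Int) (out : List (Int × Int)) : Prop := out = the_car_price_dict_alt total_car_cnt step_1 delta_price_1 step_2 delta_price_2 step_3 delta_price_3
instance (total_car_cnt : Int) (step_1 : Int) (delta_price_1 : Int) (step_2 : Int) (delta_price_2 : Int) (step_3 : Int) (delta_price_3 : Int) (out : List (Int × Int)) : Decidable (Spec_the_car_price_dict total_car_cnt step_1 delta_price_1 step_2 delta_price_2 step_3 delta_price_3 out) := by unfold Spec_the_car_price_dict; infer_instance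

-- ===== CLAIM (what is proved, stated in full; the proofs are below) =====
def Claim_equal_the_car_price_dict : Prop := ∀ (total_car_cnt : Int) (step_1 : Int) (delta_price_1 : Int) (step_2 : Int) (delta_price_2 : Int) (step_3 : Int) (delta_price_3 : Int), Dom_the_car_price_dict total_car_cnt step_1 delta_price_1 step_2 delta_price_2 step_3 delta_price_3 → Spec_the_car_price_dict total_car_cnt step_1 delta_price_1 step_2 delta_price_2 step_3 delta_price_3 (the_car_price_dict total_car_cnt step_1 delta_price_1 step_2 delta_price_2 step_3 delta_price_3)

-- ===== LEMMAS AND PROOFS =====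
-- A's fill loop over range(1, n+1) inserts fresh distinct keys into the empty dict,
-- so its items are exactly the one-shot map B builds.
lemma items_fill_loop (n v : Int) :
    ((PySem.List.pyRange 1 (n + 1) 1).foldl
      (fun (d : PySem.Dict Int Int) i => d.insert i v) PySem.Dict.empty).items
    = (PySem.List.pyRange 1 (n + 1) 1).map (fun i => (i, v)) := by
  have h := PySem.Dict.items_foldl_insert_fresh
    (l := PySem.List.pyRange 1 (n + 1) 1) (k := fun i => i) (v := fun _ => v)
    (d := (PySem.Dict.empty : PySem.Dict Int Int))
    (by intro a _; simp [PySem.Dict.contains_empty])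
    (by simpa using PySem.List.nodup_pyRange_one 1 (n + 1))
  simpa using h

-- ===== VERDICT (by name: the statement is the Claim_ definition above) =====
theorem the_car_price_dict_spec : Claim_equal_the_car_price_dict := by
  intro n s1 d1 s2 d2 s3 d3 _
  unfold Spec_the_car_price_dict the_car_price_dict the_car_price_dict_alt
  simp only [pvBandPrice]
  split_ifs with h1 h2 h3 <;>
    simp only [items_fill_loop] <;>
    first
      | (exfalso; omega)
      | rfl
      | (apply List.map_congr_left; intro i _; congr 1; ring)
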